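-- pv_equiv track=rewrite | github.com/yoddidahsyat/dumbways | 1.py | urutKata
-- ===== SOURCE A (Python) =====
-- def urutKata(kalimat):
--     list1 = kalimat.split()
--     list2 = []
--     for i in range(1, 10):
--         for x in range(len(list1)):
--             if str(i) in list1[x]:
--                 list2.append(list1[x])
--     kalimatnew = ' '.join(list2)
--     return kalimatnew
-- ===== SOURCE B (Python) =====
-- def urutKata(kalimat):
--     buckets = [[] for _ in range(9)]
--     for word in kalimat.split():
--         for ch in set(word):
--             if '1' <= ch <= '9':
--                 buckets[ord(ch) - ord('1')].append(word)
--     return ' '.join(w for b in buckets for w in b)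
-- ===== Notes on version B (the rewrite author's own statement) =====
-- stated objective: alternative
-- what changed: Replaces A's nine full passes over the word list (one substring scan per digit) by a single pass that drops each word into per-digit buckets keyed by its distinct characters, then flattens the buckets in digit order; fewer passes, but per-character bucketing costs about the same in CPython.
import Mathlib
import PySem

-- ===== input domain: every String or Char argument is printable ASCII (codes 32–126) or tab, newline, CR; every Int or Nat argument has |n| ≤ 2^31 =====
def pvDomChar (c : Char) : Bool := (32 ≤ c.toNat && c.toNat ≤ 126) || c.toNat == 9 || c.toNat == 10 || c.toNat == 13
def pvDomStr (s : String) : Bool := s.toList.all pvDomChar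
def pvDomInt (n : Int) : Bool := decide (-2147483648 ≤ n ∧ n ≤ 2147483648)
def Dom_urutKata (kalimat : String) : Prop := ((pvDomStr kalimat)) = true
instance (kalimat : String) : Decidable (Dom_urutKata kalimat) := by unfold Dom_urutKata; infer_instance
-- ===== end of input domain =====

-- B replaces A's nine passes over the word list (one per digit) by a single pass that drops
-- each word into per-digit buckets keyed by its distinct characters; objective: alternative single-pass algorithm.

-- ===== PORT A =====
def urutKata (kalimat : String) : String :=
  let list1 := PySem.Str.split₀ kalimat
  let list2 := (PySem.List.pyRange 1 10 1).foldl (fun acc i =>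
    (PySem.List.pyRange 0 (list1.length : Int) 1).foldl (fun acc2 x =>
      if PySem.Str.isIn (PySem.Int.toStr i) (PySem.List.pyGetD list1 x "") then
        acc2 ++ [PySem.List.pyGetD list1 x ""]
      else acc2) acc) []
  PySem.Str.join " " list2

-- ===== PORT B =====
-- one step per word: append the word to the bucket of every distinct digit character it contains
def pvBucketStep (bs : List (List String)) (w : String) : List (List String) :=
  (PySem.Set.ofList w.toList).foldl (fun bs2 ch =>
    if '1' ≤ ch ∧ ch ≤ '9' then bs2.modify (ch.toNat - 49) (fun b => b ++ [w]) else bs2) bs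

def urutKata_alt (kalimat : String) : String :=
  let words := PySem.Str.split₀ kalimat
  let buckets := words.foldl pvBucketStep (List.replicate 9 [])
  PySem.Str.join " " buckets.flatten

-- ===== PRECONDITION & SPEC =====
def Spec_urutKata (kalimat : String) (out : String) : Prop := out = urutKata_alt kalimat
instance (kalimat : String) (out : String) : Decidable (Spec_urutKata kalimat out) := by unfold Spec_urutKata; infer_instance

-- ===== CLAIM (what is proved, stated in full; the proofs are below) =====
def Claim_equal_urutKata : Prop := ∀ (kalimat : String), Dom_urutKata kalimat → Spec_urutKata kalimat (urutKata kalimat)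

-- ===== LEMMAS AND PROOFS =====

-- the digit character of bucket i (i < 9): '1' + i
def pvDchar (i : Nat) : Char :=
  match i with
  | 0 => '1' | 1 => '2' | 2 => '3' | 3 => '4' | 4 => '5'
  | 5 => '6' | 6 => '7' | 7 => '8' | _ => '9'

lemma pvDchar_toNat {i : Nat} (hi : i < 9) : (pvDchar i).toNat = 49 + i := by
  interval_cases i <;> decide

lemma pvDchar_digit {i : Nat} (hi : i < 9) : '1' ≤ pvDchar i ∧ pvDchar i ≤ '9' := by
  interval_cases i <;> decide

lemma pvDigit_eq_dchar {c : Char} (h1 : '1' ≤ c) (_h9 : c ≤ '9') {i : Nat} (hi : i < 9)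
    (hidx : c.toNat - 49 = i) : c = pvDchar i := by
  have h1' : 49 ≤ c.toNat := h1
  have hN : c.toNat = (pvDchar i).toNat := by rw [pvDchar_toNat hi]; omega
  exact Char.ext (by
    have : c.val.toNat = (pvDchar i).val.toNat := hN
    exact UInt32.toNat.inj this)

lemma singleton_infix {α : Type} (a : α) (l : List α) : [a] <:+: l ↔ a ∈ l := by
  constructor
  · intro h; exact h.sublist.subset (by simp)
  · intro h
    obtain ⟨s, t, rfl⟩ := List.append_of_mem h
    exact ⟨s, t, by simp⟩

lemma isIn_single (c : Char) (w : String) :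
    PySem.Str.isIn (String.ofList [c]) w = decide (c ∈ w.toList) := by
  rw [Bool.eq_iff_iff, PySem.Str.isIn_iff_infix]
  simp only [String.toList_ofList]
  simp [singleton_infix]

-- inner loop over the distinct characters of a word
lemma pvStep_getElem? (w : String) (cs : List Char) (hnd : cs.Nodup) :
    ∀ (bs : List (List String)) (i : Nat), i < 9 →
    ((cs.foldl (fun bs2 ch =>
        if '1' ≤ ch ∧ ch ≤ '9' then bs2.modify (ch.toNat - 49) (fun b => b ++ [w]) else bs2) bs))[i]?
      = (bs[i]?).map (fun b => b ++ if pvDchar i ∈ cs then [w] else []) := by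
  induction cs with
  | nil => intro bs i hi; simp
  | cons c cs ih =>
    intro bs i hi
    obtain ⟨hc, hnd'⟩ := List.nodup_cons.mp hnd
    simp only [List.foldl_cons]
    by_cases hd : '1' ≤ c ∧ c ≤ '9'
    · rw [if_pos hd]
      rw [ih hnd' _ i hi]
      by_cases hji : c.toNat - 49 = i
      · have hceq : c = pvDchar i := pvDigit_eq_dchar hd.1 hd.2 hi hji
        have hnotin : pvDchar i ∉ cs := hceq ▸ hc
        rw [List.getElem?_modify, hji]
        simp only [hnotin, hceq, List.mem_cons, true_or, if_pos]
        cases bs[i]? <;> simp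
      · have hne : pvDchar i ≠ c := by
          intro h
          apply hji
          rw [← h, pvDchar_toNat hi]
          omega
        rw [List.getElem?_modify]
        simp only [if_neg hji]
        cases bs[i]? <;> simp [hne]
    · rw [if_neg hd]
      rw [ih hnd' _ i hi]
      have hne : pvDchar i ≠ c := by
        intro h
        exact hd (h ▸ pvDchar_digit hi)
      simp [hne]

lemma pvBucketStep_getElem? (bs : List (List String)) (w : String) {i : Nat} (hi : i < 9) :
    (pvBucketStep bs w)[i]? = (bs[i]?).map
      (fun b => b ++ if pvDchar i ∈ w.toList then [w] else []) := by
  unfold pvBucketStep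
  rw [pvStep_getElem? w _ (PySem.Set.nodup_ofList _) bs i hi]
  simp [PySem.Set.mem_ofList]

-- outer loop over the words
lemma pvBuckets_getElem? (ws : List String) :
    ∀ (bs : List (List String)) (i : Nat), i < 9 →
    ((ws.foldl pvBucketStep bs))[i]?
      = (bs[i]?).map (fun b => b ++ ws.filter (fun w => decide (pvDchar i ∈ w.toList))) := by
  induction ws with
  | nil => intro bs i hi; simp
  | cons w ws ih =>
    intro bs i hi
    simp only [List.foldl_cons]
    rw [ih _ i hi, pvBucketStep_getElem? bs w hi]
    by_cases hm : pvDchar i ∈ w.toList <;>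
      cases bs[i]? <;> simp [hm]

-- length is preserved by the bucket fold
lemma pvStep_length (w : String) (cs : List Char) :
    ∀ (bs : List (List String)),
    ((cs.foldl (fun bs2 ch =>
        if '1' ≤ ch ∧ ch ≤ '9' then bs2.modify (ch.toNat - 49) (fun b => b ++ [w]) else bs2) bs)).length
      = bs.length := by
  induction cs with
  | nil => intro bs; simp
  | cons c cs ih =>
    intro bs
    simp only [List.foldl_cons]
    rw [ih]
    by_cases hd : '1' ≤ c ∧ c ≤ '9' <;> simp [hd]

lemma pvBuckets_length (ws : List String) :
    ∀ (bs : List (List String)), ((ws.foldl pvBucketStep bs)).length = bs.length := by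
  induction ws with
  | nil => intro bs; rfl
  | cons w ws ih =>
    intro bs
    simp only [List.foldl_cons]
    rw [ih, pvBucketStep, pvStep_length]

-- the filtered sub-list of words for bucket i
def pvF (ws : List String) (i : Nat) : List String :=
  ws.filter (fun w => decide (pvDchar i ∈ w.toList))

lemma pvBuckets_eq (ws : List String) :
    ws.foldl pvBucketStep (List.replicate 9 []) =
      [pvF ws 0, pvF ws 1, pvF ws 2, pvF ws 3, pvF ws 4, pvF ws 5, pvF ws 6, pvF ws 7, pvF ws 8] := by
  apply List.ext_getElem?
  intro i
  by_cases hi : i < 9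
  · rw [pvBuckets_getElem? ws _ i hi]
    interval_cases i <;> simp [pvF]
  · have h1 : (ws.foldl pvBucketStep (List.replicate 9 []))[i]? = none := by
      apply List.getElem?_eq_none
      rw [pvBuckets_length]
      simpa using Nat.le_of_not_lt hi
    have h2 : ([pvF ws 0, pvF ws 1, pvF ws 2, pvF ws 3, pvF ws 4, pvF ws 5, pvF ws 6, pvF ws 7,
        pvF ws 8])[i]? = none := by
      apply List.getElem?_eq_none
      simpa using Nat.le_of_not_lt hi
    rw [h1, h2]

-- A's inner pass over the indices of list1 is the filter by substring membership
lemma pvA_filter (ws : List String) (i : Int) (acc : List String) :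
    (PySem.List.pyRange 0 (ws.length : Int) 1).foldl (fun acc2 x =>
        if PySem.Str.isIn (PySem.Int.toStr i) (PySem.List.pyGetD ws x "") then
          acc2 ++ [PySem.List.pyGetD ws x ""]
        else acc2) acc
      = acc ++ ws.filter (fun w => PySem.Str.isIn (PySem.Int.toStr i) w) := by
  rw [PySem.List.foldl_pyRange_zero_pyGetD' ws "" (fun acc2 w =>
        if PySem.Str.isIn (PySem.Int.toStr i) w then acc2 ++ [w] else acc2) acc]
  exact PySem.List.foldl_append_if_eq_filter _ ws acc

-- for the nine concrete digits, A's substring test is B's character-membership test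
lemma pvFilter_eq (ws : List String) {k : Nat} (hk : k < 9) :
    ws.filter (fun w => PySem.Str.isIn (PySem.Int.toStr ((k : Int) + 1)) w) = pvF ws k := by
  unfold pvF
  apply List.filter_congr
  intro w _
  have hs : PySem.Int.toStr ((k : Int) + 1) = String.ofList [pvDchar k] := by
    interval_cases k <;> decide
  rw [hs, isIn_single]

-- ===== VERDICT (by name: the statement is the Claim_ definition above) =====
set_option maxHeartbeats 1000000 in
theorem urutKata_spec : Claim_equal_urutKata := by
  intro kalimat _
  unfold Spec_urutKata urutKata urutKata_alt
  dsimp only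
  set ws := PySem.Str.split₀ kalimat with hws
  congr 1
  rw [pvBuckets_eq ws]
  have hr : PySem.List.pyRange 1 10 1 = [1, 2, 3, 4, 5, 6, 7, 8, 9] := by decide
  rw [hr]
  simp only [List.foldl_cons, List.foldl_nil]
  rw [pvA_filter, pvA_filter, pvA_filter, pvA_filter, pvA_filter, pvA_filter, pvA_filter,
    pvA_filter, pvA_filter]
  have h1 := pvFilter_eq ws (by norm_num : (0:Nat) < 9)
  have h2 := pvFilter_eq ws (by norm_num : (1:Nat) < 9)
  have h3 := pvFilter_eq ws (by norm_num : (2:Nat) < 9)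
  have h4 := pvFilter_eq ws (by norm_num : (3:Nat) < 9)
  have h5 := pvFilter_eq ws (by norm_num : (4:Nat) < 9)
  have h6 := pvFilter_eq ws (by norm_num : (5:Nat) < 9)
  have h7 := pvFilter_eq ws (by norm_num : (6:Nat) < 9)
  have h8 := pvFilter_eq ws (by norm_num : (7:Nat) < 9)
  have h9 := pvFilter_eq ws (by norm_num : (8:Nat) < 9)
  norm_num at h1 h2 h3 h4 h5 h6 h7 h8 h9
  simp [List.flatten, h1, h2, h3, h4, h5, h6, h7, h8, h9]
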